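-- pv_equiv track=rewrite | github.com/Fondamenti18/fondamenti-di-programmazione | students/1823585/homework04/program01.py | dizionario_livelli_ricorsivo
-- ===== SOURCE A (Python) =====
-- def dizionario_livelli_ricorsivo(s,ns,t=None,a=0):
--     if t is None:
--         t = {}
--     if not ns:
--         return t
--     f = []
--     for n in ns:
--         f.extend(s.get(n,[]))
--         if a not in t:
--             t[a] = []
--         t[a].append(n)
--     f.sort()
--     u = dizionario_livelli_ricorsivo(s,f,t,a+1)
--     t.update(u)
--     return t
-- ===== SOURCE B (Python) =====
-- def dizionario_livelli_ricorsivo(s,ns,t=None,a=0):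
--     if t is None:
--         t = {}
--     levels = []
--     cur = ns
--     while cur:
--         levels.append(cur)
--         cur = sorted(x for n in cur for x in s.get(n, []))
--     for i, lvl in enumerate(levels):
--         t.setdefault(a + i, []).extend(lvl)
--     return t
-- ===== Notes on version B (the rewrite author's own statement) =====
-- stated objective: alternative
-- what changed: B separates the computation into two staged passes: first a pure loop that collects the list of BFS frontiers (each next frontier built by a comprehension and sorted), then a single enumerate loop that writes level i into t[a+i]; A instead threads the dict through a per-node recursion with a final t.update(u).
import Mathlib
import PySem

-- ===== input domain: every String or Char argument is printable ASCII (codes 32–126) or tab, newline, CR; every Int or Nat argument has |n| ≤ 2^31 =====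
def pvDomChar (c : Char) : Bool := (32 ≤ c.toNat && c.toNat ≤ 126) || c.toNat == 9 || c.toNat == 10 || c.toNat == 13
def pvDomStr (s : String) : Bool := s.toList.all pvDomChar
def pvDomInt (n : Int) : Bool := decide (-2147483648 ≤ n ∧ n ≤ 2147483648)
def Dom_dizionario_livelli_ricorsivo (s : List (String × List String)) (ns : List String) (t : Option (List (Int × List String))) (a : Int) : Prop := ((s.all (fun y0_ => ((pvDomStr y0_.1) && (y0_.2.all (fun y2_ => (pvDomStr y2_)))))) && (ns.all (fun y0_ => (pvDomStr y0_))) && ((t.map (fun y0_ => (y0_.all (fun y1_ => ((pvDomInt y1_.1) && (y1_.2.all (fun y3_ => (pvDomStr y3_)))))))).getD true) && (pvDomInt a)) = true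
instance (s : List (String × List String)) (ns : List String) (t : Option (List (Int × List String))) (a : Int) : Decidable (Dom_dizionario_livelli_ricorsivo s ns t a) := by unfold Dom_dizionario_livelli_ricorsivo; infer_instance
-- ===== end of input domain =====

-- B computes the same dict in two staged passes (collect all BFS frontiers, then write level i
-- into t[a+i] with one enumerate loop) instead of A's per-node recursion with a final no-op
-- t.update(u).  Both Pythons mutate the caller's dict t in place; the equivalence proved here is
-- about the RETURN value (the dict as an association list in insertion order).

-- ===== PORT A =====
-- s.get(n, [])
def pvGetA (s : List (String × List String)) (n : String) : List String :=
  (PySem.Dict.mk s).getD n []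

-- the 'for n in ns' body: f.extend(s.get(n,[])); if a not in t: t[a] = []; t[a].append(n)
def pvLevelA (s : List (String × List String)) (ns : List String)
    (t : PySem.Dict Int (List String)) (a : Int) :
    List String × PySem.Dict Int (List String) :=
  ns.foldl
    (fun p n =>
      (p.1 ++ pvGetA s n,
       (if p.2.contains a then p.2 else p.2.insert a []).modify a [] (fun l => l ++ [n])))
    ([], t)

-- the recursion of A; the Nat argument is a fuel guard only (the 0 branch is never reached when
-- the Python recursion terminates: it needs at most s.length+2 levels — see Pre_ below)
def pvRecA (s : List (String × List String)) :
    Nat → List String → PySem.Dict Int (List String) → Int → PySem.Dict Int (List String)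
  | 0, _, t, _ => t
  | fuel + 1, ns, t, a =>
      if ns = [] then t
      else
        let p := pvLevelA s ns t a
        let u := pvRecA s fuel (PySem.List.sorted p.1 (fun x => x) false) p.2 (a + 1)
        PySem.Dict.update p.2 u.items   -- t.update(u); return t

def dizionario_livelli_ricorsivo (s : List (String × List String)) (ns : List String)
    (t : Option (List (Int × List String))) (a : Int) : List (Int × List String) :=
  (pvRecA s (s.length + 2) ns (PySem.Dict.mk (t.getD [])) a).items

-- ===== PORT B =====
-- sorted(x for n in cur for x in s.get(n, []))
def pvNext (s : List (String × List String)) (cur : List String) : List String :=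
  PySem.List.sorted (cur.flatMap (fun n => (PySem.Dict.mk s).getD n [])) (fun x => x) false

-- the 'while cur:' loop of Source B collecting the frontiers; same fuel guard as the A side
def pvLevels (s : List (String × List String)) : Nat → List String → List (List String)
  | 0, _ => []
  | fuel + 1, cur => if cur = [] then [] else cur :: pvLevels s fuel (pvNext s cur)

-- t.setdefault(k, []).extend(lvl)
def pvWrite (t : PySem.Dict Int (List String)) (k : Int) (lvl : List String) :
    PySem.Dict Int (List String) :=
  (t.setdefault k []).modify k [] (fun l => l ++ lvl)

def dizionario_livelli_ricorsivo_alt (s : List (String × List String)) (ns : List String)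
    (t : Option (List (Int × List String))) (a : Int) : List (Int × List String) :=
  ((PySem.List.enumerate (pvLevels s (s.length + 2) ns) 0).foldl
      (fun d p => pvWrite d (a + p.1) p.2)
      (PySem.Dict.mk (t.getD []))).items

-- ===== PRECONDITION & SPEC =====
-- Pre_ excludes (i) inputs whose successor graph has a cycle reachable from ns — exactly the
-- inputs on which Python A recurses forever (RecursionError) instead of returning: no cycle is
-- reachable iff no walk from ns is longer than s.length+1, i.e. the (s.length+1)-fold
-- successor image of ns (as a set) is empty — and (ii) an initial t with duplicate integer
-- keys, which no Python dict can represent.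
def Pre_dizionario_livelli_ricorsivo (s : List (String × List String)) (ns : List String)
    (t : Option (List (Int × List String))) (a : Int) : Prop :=
  (fun X => PySem.List.dedup (X.flatMap (fun n => (PySem.Dict.mk s).getD n [])))^[s.length + 1]
      (PySem.List.dedup ns) = []
    ∧ ((t.getD []).map Prod.fst).Nodup

instance (s : List (String × List String)) (ns : List String) (t : Option (List (Int × List String))) (a : Int) : Decidable (Pre_dizionario_livelli_ricorsivo s ns t a) := by unfold Pre_dizionario_livelli_ricorsivo; infer_instance

def pvWitness_dizionario_livelli_ricorsivo : (List (String × List String)) × List String × (Option (List (Int × List String))) × Int :=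
  ([("a", ["b", "c"]), ("b", ["c"])], ["a"], none, 0)

def Spec_dizionario_livelli_ricorsivo (s : List (String × List String)) (ns : List String) (t : Option (List (Int × List String))) (a : Int) (out : List (Int × List String)) : Prop := out = dizionario_livelli_ricorsivo_alt s ns t a
instance (s : List (String × List String)) (ns : List String) (t : Option (List (Int × List String))) (a : Int) (out : List (Int × List String)) : Decidable (Spec_dizionario_livelli_ricorsivo s ns t a out) := by unfold Spec_dizionario_livelli_ricorsivo; infer_instance

-- ===== CLAIM (what is proved, stated in full; the proofs are below) =====
def Claim_equal_dizionario_livelli_ricorsivo : Prop := ∀ (s : List (String × List String)) (ns : List String) (t : Option (List (Int × List String))) (a : Int), Dom_dizionario_livelli_ricorsivo s ns t a → Pre_dizionario_livelli_ricorsivo s ns t a → Spec_dizionario_livelli_ricorsivo s ns t a (dizionario_livelli_ricorsivo s ns t a)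

-- ===== LEMMAS AND PROOFS =====

-- one iteration of A's inner loop, acting on the dict only
def pvStep (a : Int) (t : PySem.Dict Int (List String)) (n : String) :
    PySem.Dict Int (List String) :=
  (t.setdefault a []).modify a [] (fun l => l ++ [n])

-- B's writing pass, with its base level made explicit
def pvApplyLevels (a : Int) (t : PySem.Dict Int (List String))
    (L : List (Int × List String)) : PySem.Dict Int (List String) :=
  L.foldl (fun d p => pvWrite d (a + p.1) p.2) t

-- A's "if a not in t: t[a] = []" is exactly setdefault
lemma pv_if_insert_eq_setdefault (t : PySem.Dict Int (List String)) (a : Int) :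
    (if t.contains a then t else t.insert a []) = t.setdefault a [] := by
  by_cases h : t.contains a <;> simp [PySem.Dict.setdefault, PySem.Dict.insert, h]

-- a fold over a pair whose components evolve independently
lemma pv_foldl_fst {α β γ : Type} (g1 : α → γ → α) (g2 : β → γ → β) (l : List γ) (p : α × β) :
    (l.foldl (fun p x => (g1 p.1 x, g2 p.2 x)) p).1 = l.foldl g1 p.1 := by
  induction l generalizing p with
  | nil => rfl
  | cons x l ih => simp [List.foldl_cons, ih]

lemma pv_foldl_snd {α β γ : Type} (g1 : α → γ → α) (g2 : β → γ → β) (l : List γ) (p : α × β) :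
    (l.foldl (fun p x => (g1 p.1 x, g2 p.2 x)) p).2 = l.foldl g2 p.2 := by
  induction l generalizing p with
  | nil => rfl
  | cons x l ih => simp [List.foldl_cons, ih]

-- A's frontier f is the concatenated successor lists
lemma pv_levelA_fst (s : List (String × List String)) (ns : List String)
    (t : PySem.Dict Int (List String)) (a : Int) :
    (pvLevelA s ns t a).1 = ns.flatMap (fun n => (PySem.Dict.mk s).getD n []) := by
  unfold pvLevelA
  rw [pv_foldl_fst (fun f n => f ++ pvGetA s n)
    (fun t n => (if t.contains a then t else t.insert a []).modify a [] (fun l => l ++ [n]))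
    ns ([], t)]
  simpa [pvGetA] using PySem.List.foldl_append_eq_flatMap (fun n => (PySem.Dict.mk s).getD n [])
    ns ([] : List String)

lemma pv_levelA_snd (s : List (String × List String)) (ns : List String)
    (t : PySem.Dict Int (List String)) (a : Int) :
    (pvLevelA s ns t a).2 = ns.foldl (pvStep a) t := by
  unfold pvLevelA
  rw [pv_foldl_snd (fun f n => f ++ pvGetA s n)
    (fun t n => (if t.contains a then t else t.insert a []).modify a [] (fun l => l ++ [n]))
    ns ([], t)]
  congr 1
  funext t n
  rw [pv_if_insert_eq_setdefault]
  rfl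

-- once the key is present, A's per-node loop just appends to its value slot
lemma pv_fold_append (a : Int) (l : List String) (t : PySem.Dict Int (List String))
    (h : t.contains a = true) :
    l.foldl (pvStep a) t = t.insert a (t.getD a [] ++ l) ∨ l = [] := by
  induction l using List.reverseRecOn with
  | nil => exact Or.inr rfl
  | append_singleton l n ih =>
    left
    rw [List.foldl_append, List.foldl_cons, List.foldl_nil]
    rcases ih with ih | rfl
    · rw [ih]
      unfold pvStep
      rw [PySem.Dict.setdefault_of_contains _ _ (by simp [PySem.Dict.contains_insert_self]),
        PySem.Dict.modify, PySem.Dict.getD_insert_self, PySem.Dict.insert_insert_self,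
        List.append_assoc]
    · unfold pvStep
      rw [List.foldl_nil, PySem.Dict.setdefault_of_contains _ _ h, PySem.Dict.modify]
      simp

-- A's per-node loop over one whole level collapses to B's single write
lemma pv_fold_collapse (a : Int) (ns : List String) (t : PySem.Dict Int (List String))
    (h : ns ≠ []) :
    ns.foldl (pvStep a) t = pvWrite t a ns := by
  by_cases hc : t.contains a = true
  · rcases pv_fold_append a ns t hc with he | rfl
    · rw [he]
      unfold pvWrite
      rw [PySem.Dict.setdefault_of_contains _ _ hc, PySem.Dict.modify]
    · exact absurd rfl h
  · obtain ⟨n, rest, rfl⟩ : ∃ n rest, ns = n :: rest := by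
      cases ns with
      | nil => exact absurd rfl h
      | cons n rest => exact ⟨n, rest, rfl⟩
    have hset : t.setdefault a [] = t.insert a [] :=
      PySem.Dict.setdefault_of_not_contains _ _ (by simpa using hc)
    have hstep : pvStep a t n = t.insert a [n] := by
      unfold pvStep
      rw [hset, PySem.Dict.modify, PySem.Dict.getD_insert_self,
        PySem.Dict.insert_insert_self]
      simp
    have hwrite : pvWrite t a (n :: rest) = t.insert a (n :: rest) := by
      unfold pvWrite
      rw [hset, PySem.Dict.modify, PySem.Dict.getD_insert_self,
        PySem.Dict.insert_insert_self]
      simp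
    rw [List.foldl_cons, hstep, hwrite]
    rcases pv_fold_append a rest (t.insert a [n])
        (PySem.Dict.contains_insert_self t a [n]) with he | rfl
    · rw [he, PySem.Dict.getD_insert_self, PySem.Dict.insert_insert_self]
      simp
    · simp

-- keys evolution of one write: keys are extended and stay Nodup
lemma pv_write_keys (t : PySem.Dict Int (List String)) (k : Int) (lvl : List String)
    (h : t.keys.Nodup) :
    ∃ r, (pvWrite t k lvl).keys = t.keys ++ r ∧ (pvWrite t k lvl).keys.Nodup := by
  unfold pvWrite
  by_cases h1 : t.contains k = true
  · refine ⟨[], ?_, ?_⟩ <;>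
      rw [PySem.Dict.setdefault, if_pos h1, PySem.Dict.keys_modify,
        PySem.Dict.keys_insert_of_contains _ _ h1] <;> simp [h]
  · have hset : t.setdefault k [] = t.insert k [] := by
      simp [PySem.Dict.setdefault, PySem.Dict.insert, h1]
    have hc : (t.insert k ([] : List String)).contains k = true :=
      PySem.Dict.contains_insert_self t k []
    have hkeys : ((t.setdefault k []).modify k [] (fun l => l ++ lvl)).keys
        = t.keys ++ [k] := by
      rw [hset, PySem.Dict.keys_modify, PySem.Dict.keys_insert_of_contains _ _ hc,
        PySem.Dict.keys_insert_of_not_contains _ _ (by simpa using h1)]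
    refine ⟨[k], hkeys, ?_⟩
    rw [hkeys]
    have hnk : k ∉ t.keys := by
      intro hmem
      exact h1 ((PySem.Dict.contains_iff_mem_keys t k).mpr hmem)
    simp only [List.nodup_append, List.nodup_cons]
    refine ⟨h, by simp, ?_⟩
    intro x hx b hb
    simp only [List.mem_singleton] at hb
    subst hb
    exact fun hxk => hnk (hxk ▸ hx)

-- B's writing pass only extends the key list, keeping it Nodup
lemma pv_apply_keys (a : Int) (L : List (Int × List String))
    (t : PySem.Dict Int (List String)) (h : t.keys.Nodup) :
    ∃ r, (pvApplyLevels a t L).keys = t.keys ++ r ∧ (pvApplyLevels a t L).keys.Nodup := by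
  induction L generalizing t with
  | nil => exact ⟨[], by simp [pvApplyLevels], by simpa [pvApplyLevels] using h⟩
  | cons p L ih =>
    obtain ⟨r0, hr0, hn0⟩ := pv_write_keys t (a + p.1) p.2 h
    obtain ⟨r1, hr1, hn1⟩ := ih (pvWrite t (a + p.1) p.2) hn0
    exact ⟨r0 ++ r1,
      by simpa [pvApplyLevels, List.foldl_cons, hr0] using hr1,
      by simpa [pvApplyLevels, List.foldl_cons] using hn1⟩

-- shifting the enumerate start by one is shifting the base level by one
lemma pv_apply_shift (a : Int) (L : List (List String)) :
    ∀ (k : Int) (t : PySem.Dict Int (List String)),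
      pvApplyLevels a t (PySem.List.enumerate L (k + 1))
        = pvApplyLevels (a + 1) t (PySem.List.enumerate L k) := by
  induction L with
  | nil => intro k t; rfl
  | cons x L ih =>
    intro k t
    rw [PySem.List.enumerate_cons, PySem.List.enumerate_cons]
    show pvApplyLevels a (pvWrite t (a + (k + 1)) x) (PySem.List.enumerate L (k + 1 + 1))
      = pvApplyLevels (a + 1) (pvWrite t (a + 1 + k) x) (PySem.List.enumerate L (k + 1))
    rw [ih (k + 1), show a + (k + 1) = a + 1 + k by ring]

-- inserting, in order, pairs whose keys replay the keys of the tail of the dict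
-- replaces that tail in place
lemma pv_foldl_insert_prefix (m : List (Int × List String)) :
    ∀ (pre l : List (Int × List String)),
      ((pre ++ m).map Prod.fst).Nodup → m.map Prod.fst = l.map Prod.fst →
      m.foldl (fun acc p => acc.insert p.1 p.2) (PySem.Dict.mk (pre ++ l))
        = PySem.Dict.mk (pre ++ m) := by
  induction m with
  | nil =>
    intro pre l _ hm
    have : l = [] := by simpa using (List.map_eq_nil_iff.mp hm.symm)
    simp [this]
  | cons c m ih =>
    intro pre l hnd hm
    obtain ⟨c', l', rfl⟩ : ∃ c' l', l = c' :: l' := by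
      cases l with
      | nil => simp at hm
      | cons c' l' => exact ⟨c', l', rfl⟩
    have hm' : c.1 = c'.1 ∧ m.map Prod.fst = l'.map Prod.fst := by simpa using hm
    have hnd' : (pre.map Prod.fst ++ c.1 :: m.map Prod.fst).Nodup := by simpa using hnd
    have hdisj := (List.nodup_append.mp hnd').2.2
    have hkpre : ∀ p ∈ pre, p.1 ≠ c.1 := by
      intro p hp
      exact hdisj p.1 (List.mem_map_of_mem hp) c.1 (by simp)
    have hkm : c.1 ∉ m.map Prod.fst :=
      (List.nodup_cons.mp (List.nodup_append.mp hnd').2.1).1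
    have hcontains : (PySem.Dict.mk (pre ++ c' :: l')).contains c.1 = true := by
      simp [PySem.Dict.contains, List.any_append, hm'.1]
    have hins : (PySem.Dict.mk (pre ++ c' :: l')).insert c.1 c.2
        = PySem.Dict.mk ((pre ++ [c]) ++ l') := by
      apply PySem.Dict.ext
      rw [PySem.Dict.insert, if_pos hcontains]
      show ((pre ++ c' :: l').map _) = _
      rw [List.map_append, List.map_cons]
      have hpre : pre.map (fun p => if p.1 == c.1 then (c.1, c.2) else p) = pre := by
        rw [List.map_congr_left (g := id) (fun p hp => by simp [hkpre p hp]), List.map_id]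
      have hl' : l'.map (fun p => if p.1 == c.1 then (c.1, c.2) else p) = l' := by
        have hne : ∀ p ∈ l', p.1 ≠ c.1 := by
          intro p hp hpc
          exact hkm (hpc ▸ (hm'.2 ▸ List.mem_map_of_mem hp))
        rw [List.map_congr_left (g := id) (fun p hp => by simp [hne p hp]), List.map_id]
      rw [hpre, hl']
      simp [hm'.1.symm]
    calc (c :: m).foldl (fun acc p => acc.insert p.1 p.2) (PySem.Dict.mk (pre ++ c' :: l'))
        = m.foldl (fun acc p => acc.insert p.1 p.2) (PySem.Dict.mk ((pre ++ [c]) ++ l')) := by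
          rw [List.foldl_cons, hins]
      _ = PySem.Dict.mk ((pre ++ [c]) ++ m) := ih (pre ++ [c]) l' (by simpa using hnd) hm'.2
      _ = PySem.Dict.mk (pre ++ c :: m) := by simp

-- d.update(u.items) = u whenever u's items extend d's keys in place
-- (Python's t.update(u) with u an in-place extension of t)
lemma pv_update_extension (d u : PySem.Dict Int (List String)) (r : List Int)
    (hk : u.keys = d.keys ++ r) (hn : u.keys.Nodup) :
    PySem.Dict.update d u.items = u := by
  have hkeys : u.items.map Prod.fst = d.items.map Prod.fst ++ r := by
    simpa [PySem.Dict.keys] using hk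
  have hnu : (d.items.map Prod.fst ++ r).Nodup := by
    rw [← hkeys]; simpa [PySem.Dict.keys] using hn
  have hlen : d.items.length = (d.items.map Prod.fst).length := by simp
  set m1 := u.items.take d.items.length with hm1def
  set m2 := u.items.drop d.items.length with hm2def
  have hm1k : m1.map Prod.fst = d.items.map Prod.fst := by
    rw [hm1def, List.map_take, hkeys, hlen, List.take_left]
  have hm2k : m2.map Prod.fst = r := by
    rw [hm2def, List.map_drop, hkeys, hlen, List.drop_left]
  have hsplit : m1 ++ m2 = u.items := List.take_append_drop _ _
  have hstage1 : m1.foldl (fun acc p => acc.insert p.1 p.2) d = PySem.Dict.mk m1 := by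
    have := pv_foldl_insert_prefix m1 [] d.items
      (by simpa [hm1k] using (List.nodup_append.mp hnu).1) hm1k
    simpa using this
  have hfresh : ∀ p ∈ m2, (PySem.Dict.mk m1).contains p.1 = false := by
    intro p hp
    rw [PySem.Dict.contains, List.any_eq_false]
    intro q hq
    have hq1 : q.1 ∈ d.items.map Prod.fst := hm1k ▸ List.mem_map_of_mem hq
    have hp1 : p.1 ∈ r := hm2k ▸ List.mem_map_of_mem hp
    have := (List.nodup_append.mp hnu).2.2 q.1 hq1 p.1 hp1
    simpa using this
  have hnd2 : (m2.map Prod.fst).Nodup := by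
    rw [hm2k]; exact (List.nodup_append.mp hnu).2.1
  have hstage2 :
      m2.foldl (fun acc p => acc.insert p.1 p.2) (PySem.Dict.mk m1) = PySem.Dict.mk (m1 ++ m2) := by
    apply PySem.Dict.ext
    have := PySem.Dict.items_foldl_insert_fresh m2 Prod.fst Prod.snd (PySem.Dict.mk m1) hfresh hnd2
    simpa using this
  calc PySem.Dict.update d u.items
      = (m1 ++ m2).foldl (fun acc p => acc.insert p.1 p.2) d := by rw [hsplit]; rfl
    _ = PySem.Dict.mk (m1 ++ m2) := by rw [List.foldl_append, hstage1, hstage2]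
    _ = u := by rw [hsplit]

-- main induction: A's recursion is B's collect-then-write for every fuel
lemma pv_rec_eq_apply (s : List (String × List String)) (fuel : Nat) (ns : List String)
    (t : PySem.Dict Int (List String)) (a : Int) (h : t.keys.Nodup) :
    pvRecA s fuel ns t a = pvApplyLevels a t (PySem.List.enumerate (pvLevels s fuel ns) 0) := by
  induction fuel generalizing ns t a with
  | zero => rfl
  | succ fuel ih =>
    by_cases hns : ns = []
    · simp [pvRecA, pvLevels, pvApplyLevels, hns, PySem.List.enumerate_nil]
    · rw [pvRecA, if_neg hns]
      have hlevel : (pvLevelA s ns t a).2 = pvWrite t a ns := by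
        rw [pv_levelA_snd, pv_fold_collapse a ns t hns]
      have hfront : PySem.List.sorted (pvLevelA s ns t a).1 (fun x => x) false = pvNext s ns := by
        rw [pv_levelA_fst]; rfl
      obtain ⟨r0, hr0, hn0⟩ := pv_write_keys t a ns h
      show PySem.Dict.update (pvLevelA s ns t a).2
          (pvRecA s fuel (PySem.List.sorted (pvLevelA s ns t a).1 (fun x => x) false)
            (pvLevelA s ns t a).2 (a + 1)).items
        = pvApplyLevels a t (PySem.List.enumerate (pvLevels s (fuel + 1) ns) 0)
      rw [hlevel, hfront, ih (pvNext s ns) (pvWrite t a ns) (a + 1) hn0]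
      have hupd : PySem.Dict.update (pvWrite t a ns)
          (pvApplyLevels (a + 1) (pvWrite t a ns)
            (PySem.List.enumerate (pvLevels s fuel (pvNext s ns)) 0)).items
          = pvApplyLevels (a + 1) (pvWrite t a ns)
            (PySem.List.enumerate (pvLevels s fuel (pvNext s ns)) 0) := by
        obtain ⟨r1, hr1, hn1⟩ :=
          pv_apply_keys (a + 1) (PySem.List.enumerate (pvLevels s fuel (pvNext s ns)) 0)
            (pvWrite t a ns) hn0
        exact pv_update_extension _ _ r1 hr1 hn1
      rw [hupd, pvLevels, if_neg hns, PySem.List.enumerate_cons]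
      show pvApplyLevels (a + 1) (pvWrite t a ns)
          (PySem.List.enumerate (pvLevels s fuel (pvNext s ns)) 0)
        = pvApplyLevels a (pvWrite t (a + 0) ns)
          (PySem.List.enumerate (pvLevels s fuel (pvNext s ns)) (0 + 1))
      rw [pv_apply_shift a (pvLevels s fuel (pvNext s ns)) 0, show a + (0 : Int) = a by ring]

-- ===== VERDICT (by name: the statement is the Claim_ definition above) =====
theorem dizionario_livelli_ricorsivo_spec : Claim_equal_dizionario_livelli_ricorsivo := by
  intro s ns t a _ hpre
  unfold Spec_dizionario_livelli_ricorsivo dizionario_livelli_ricorsivo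
    dizionario_livelli_ricorsivo_alt
  rw [pv_rec_eq_apply s (s.length + 2) ns (PySem.Dict.mk (t.getD [])) a
    (by simpa [PySem.Dict.keys_mk] using hpre.2)]
  rfl
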